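-- pv_equiv track=rewrite | github.com/rjain557/tech-leads | scripts/enrich_contacts.py | title_variants
-- ===== SOURCE A (Python) =====
-- TITLE_ALIASES = {
--     "coo": ["coo", "chief operating officer", "operations director", "head of operations", "vp operations", "vp of operations"],
--     "ceo": ["ceo", "chief executive officer", "founder", "president", "managing partner"],
--     "cfo": ["cfo", "chief financial officer", "finance director", "vp finance", "vp of finance"],
--     "cio": ["cio", "chief information officer", "it director", "vp of it", "head of it"],
--     "cto": ["cto", "chief technology officer", "vp engineering", "vp of engineering", "head of engineering"],
--     "ciso": ["ciso", "chief information security officer", "security director", "vp security"],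
--     "cco": ["cco", "chief compliance officer", "compliance officer", "privacy officer", "compliance director", "compliance manager"],
--     "cro": ["cro", "chief revenue officer", "vp sales", "vp of sales", "head of sales", "sales director"],
--     "cmo": ["cmo", "chief marketing officer", "vp marketing", "head of marketing", "marketing director"],
--     "hr":  ["chro", "chief hr officer", "hr director", "vp hr", "head of hr", "head of people"],
-- }
--
-- def title_variants(raw_title: str) -> list[str]:
--     t = (raw_title or "").strip().lower()
--     variants = {t}
--     # Direct alias match
--     for key, aliases in TITLE_ALIASES.items():
--         if any(a in t for a in aliases):
--             variants.update(aliases)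
--     # Department hints
--     if "compliance" in t or "privacy" in t: variants.update(TITLE_ALIASES["cco"])
--     if "operations" in t: variants.update(TITLE_ALIASES["coo"])
--     if "sales" in t or "revenue" in t: variants.update(TITLE_ALIASES["cro"])
--     if "marketing" in t: variants.update(TITLE_ALIASES["cmo"])
--     if "it " in t or t.startswith("it ") or "information" in t: variants.update(TITLE_ALIASES["cio"])
--     if "technology" in t or "engineering" in t: variants.update(TITLE_ALIASES["cto"])
--     if "finance" in t or "financial" in t or t == "cfo": variants.update(TITLE_ALIASES["cfo"])
--     return list(variants)
-- ===== SOURCE B (Python) =====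
-- TITLE_ALIASES = {
--     "coo": ["coo", "chief operating officer", "operations director", "head of operations", "vp operations", "vp of operations"],
--     "ceo": ["ceo", "chief executive officer", "founder", "president", "managing partner"],
--     "cfo": ["cfo", "chief financial officer", "finance director", "vp finance", "vp of finance"],
--     "cio": ["cio", "chief information officer", "it director", "vp of it", "head of it"],
--     "cto": ["cto", "chief technology officer", "vp engineering", "vp of engineering", "head of engineering"],
--     "ciso": ["ciso", "chief information security officer", "security director", "vp security"],
--     "cco": ["cco", "chief compliance officer", "compliance officer", "privacy officer", "compliance director", "compliance manager"],
--     "cro": ["cro", "chief revenue officer", "vp sales", "vp of sales", "head of sales", "sales director"],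
--     "cmo": ["cmo", "chief marketing officer", "vp marketing", "head of marketing", "marketing director"],
--     "hr":  ["chro", "chief hr officer", "hr director", "vp hr", "head of hr", "head of people"],
-- }
--
-- # Department-hint trigger substrings, as data instead of seven if-statements.
-- HINTS = [
--     ("cco", ["compliance", "privacy"]),
--     ("coo", ["operations"]),
--     ("cro", ["sales", "revenue"]),
--     ("cmo", ["marketing"]),
--     ("cio", ["it ", "information"]),
--     ("cto", ["technology", "engineering"]),
--     ("cfo", ["finance", "financial"]),
-- ]
--
-- # Every trigger pattern (alias strings and hint substrings), deduplicated.
-- PATTERNS = list(dict.fromkeys(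
--     [a for als in TITLE_ALIASES.values() for a in als]
--     + [h for _, hs in HINTS for h in hs]))
--
-- # First-character index over the patterns: position i of the title only needs
-- # to be tested against the patterns starting with t[i].
-- FIRST = {}
-- for p in PATTERNS:
--     FIRST.setdefault(p[0], []).append(p)
--
-- def title_variants(raw_title: str) -> list[str]:
--     t = (raw_title or "").strip().lower()
--     # One left-to-right scan of the title: at each position record every
--     # pattern that starts there.  'hits' is the set of patterns occurring in t.
--     hits = set()
--     for i in range(len(t)):
--         for p in FIRST.get(t[i], ()):
--             if t.startswith(p, i):
--                 hits.add(p)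
--     # Assemble the triggered keys from the pre-computed hit set (no further
--     # substring search): alias-triggered keys first, then hint-triggered keys.
--     keys = [k for k, als in TITLE_ALIASES.items() if any(a in hits for a in als)]
--     keys += [k for k, hs in HINTS if any(h in hits for h in hs)]
--     out = [t]
--     for k in keys:
--         out += TITLE_ALIASES[k]
--     return list(dict.fromkeys(out))
-- ===== Notes on version B (the rewrite author's own statement) =====
-- stated objective: alternative
-- what changed: B inverts the matching: instead of A's per-key alias loop of substring tests plus seven hard-coded department-hint ifs, B makes one left-to-right scan of the title against a flat deduplicated pattern table bucketed by first character, recording at each position the set of patterns that start there, and then assembles the triggered keys from that hit set alone (no further substring search), deduplicating once.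
import Mathlib
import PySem

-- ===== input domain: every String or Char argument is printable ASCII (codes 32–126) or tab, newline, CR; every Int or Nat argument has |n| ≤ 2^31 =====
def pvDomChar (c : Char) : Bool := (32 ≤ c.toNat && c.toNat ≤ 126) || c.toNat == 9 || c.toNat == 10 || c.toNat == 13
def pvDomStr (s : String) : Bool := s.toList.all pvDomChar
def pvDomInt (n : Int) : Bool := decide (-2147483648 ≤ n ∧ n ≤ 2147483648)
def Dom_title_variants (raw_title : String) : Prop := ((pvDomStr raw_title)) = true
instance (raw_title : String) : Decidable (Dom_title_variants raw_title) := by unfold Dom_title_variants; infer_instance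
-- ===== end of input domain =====

-- B replaces A's per-alias substring loops and seven hard-coded hint ifs by one
-- left-to-right scan of the title against a flat pattern table (collecting the set of
-- matching patterns first), then a data-driven assembly of the triggered alias lists
-- (objective: alternative). Python A returns list(set) in hash order; outputs are
-- compared as sets, both ports build insertion-ordered lists.

-- TITLE_ALIASES, the module constant shared by A and B (a dict: association list in insertion order)
def pvTitleAliases : PySem.Dict String (List String) := PySem.Dict.mk
  [("coo", ["coo", "chief operating officer", "operations director", "head of operations", "vp operations", "vp of operations"]),
   ("ceo", ["ceo", "chief executive officer", "founder", "president", "managing partner"]),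
   ("cfo", ["cfo", "chief financial officer", "finance director", "vp finance", "vp of finance"]),
   ("cio", ["cio", "chief information officer", "it director", "vp of it", "head of it"]),
   ("cto", ["cto", "chief technology officer", "vp engineering", "vp of engineering", "head of engineering"]),
   ("ciso", ["ciso", "chief information security officer", "security director", "vp security"]),
   ("cco", ["cco", "chief compliance officer", "compliance officer", "privacy officer", "compliance director", "compliance manager"]),
   ("cro", ["cro", "chief revenue officer", "vp sales", "vp of sales", "head of sales", "sales director"]),
   ("cmo", ["cmo", "chief marketing officer", "vp marketing", "head of marketing", "marketing director"]),
   ("hr", ["chro", "chief hr officer", "hr director", "vp hr", "head of hr", "head of people"])]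

-- ===== PORT A =====
-- TITLE_ALIASES["k"]: the key is always present, so dict[k] (KeyError impossible) is exactly getD
def title_variants (raw_title : String) : List String :=
  let t := PySem.Str.lower (PySem.Str.strip (if raw_title == "" then "" else raw_title))
  let variants : PySem.Set String := PySem.Set.ofList [t]
  -- Direct alias match
  let variants := pvTitleAliases.items.foldl
    (fun v ka => if ka.2.any (fun a => PySem.Str.isIn a t) then PySem.Set.update v ka.2 else v) variants
  -- Department hints
  let variants := if PySem.Str.isIn "compliance" t || PySem.Str.isIn "privacy" t then
      PySem.Set.update variants (PySem.Dict.getD pvTitleAliases "cco" []) else variants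
  let variants := if PySem.Str.isIn "operations" t then
      PySem.Set.update variants (PySem.Dict.getD pvTitleAliases "coo" []) else variants
  let variants := if PySem.Str.isIn "sales" t || PySem.Str.isIn "revenue" t then
      PySem.Set.update variants (PySem.Dict.getD pvTitleAliases "cro" []) else variants
  let variants := if PySem.Str.isIn "marketing" t then
      PySem.Set.update variants (PySem.Dict.getD pvTitleAliases "cmo" []) else variants
  let variants := if PySem.Str.isIn "it " t || PySem.Str.startswith t "it " || PySem.Str.isIn "information" t then
      PySem.Set.update variants (PySem.Dict.getD pvTitleAliases "cio" []) else variants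
  let variants := if PySem.Str.isIn "technology" t || PySem.Str.isIn "engineering" t then
      PySem.Set.update variants (PySem.Dict.getD pvTitleAliases "cto" []) else variants
  let variants := if PySem.Str.isIn "finance" t || PySem.Str.isIn "financial" t || t == "cfo" then
      PySem.Set.update variants (PySem.Dict.getD pvTitleAliases "cfo" []) else variants
  variants

-- ===== PORT B =====
-- the HINTS trigger table of Source B
def pvHints : List (String × List String) :=
  [("cco", ["compliance", "privacy"]),
   ("coo", ["operations"]),
   ("cro", ["sales", "revenue"]),
   ("cmo", ["marketing"]),
   ("cio", ["it ", "information"]),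
   ("cto", ["technology", "engineering"]),
   ("cfo", ["finance", "financial"])]

-- PATTERNS of Source B: all alias strings and hint substrings, deduplicated in first-occurrence order
def pvPatterns : List String :=
  PySem.List.dedup (pvTitleAliases.values.flatten ++ (pvHints.map Prod.snd).flatten)

-- FIRST of Source B: patterns bucketed by first character (p[0]: every PATTERNS entry is
-- nonempty, so headD's default is never read; setdefault(..).append = modify … (· ++ [p]))
def pvFirst : PySem.Dict Char (List String) :=
  pvPatterns.foldl (fun d p => d.modify (p.toList.headD ' ') [] (· ++ [p])) PySem.Dict.empty

-- the 'for i in range(len(t)): for p in FIRST.get(t[i], ()): if t.startswith(p, i)' scan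
-- of Source B, structurally on the character list (position i ↔ the suffix starting there)
def pvScan : List Char → PySem.Set String → PySem.Set String
  | [], hits => hits
  | c :: rest, hits =>
      pvScan rest ((PySem.Dict.getD pvFirst c []).foldl
        (fun h p => if PySem.Chars.startswith (c :: rest) p.toList then PySem.Set.add h p else h) hits)

def title_variants_alt (raw_title : String) : List String :=
  let t := PySem.Str.lower (PySem.Str.strip (if raw_title == "" then "" else raw_title))
  let hits := pvScan t.toList PySem.Set.empty
  let keys := (pvTitleAliases.items.filter (fun ka => ka.2.any (fun a => hits.contains a))).map Prod.fst
  let keys := keys ++ (pvHints.filter (fun kh => kh.2.any (fun h => hits.contains h))).map Prod.fst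
  let out := keys.foldl (fun acc k => acc ++ PySem.Dict.getD pvTitleAliases k []) [t]
  PySem.List.dedup out

-- ===== PRECONDITION & SPEC =====
def Spec_title_variants (raw_title : String) (out : List String) : Prop := out = title_variants_alt raw_title
instance (raw_title : String) (out : List String) : Decidable (Spec_title_variants raw_title out) := by unfold Spec_title_variants; infer_instance

-- ===== CLAIM (what is proved, stated in full; the proofs are below) =====
def Claim_equal_title_variants : Prop := ∀ (raw_title : String), Dom_title_variants raw_title → Spec_title_variants raw_title (title_variants raw_title)

-- ===== LEMMAS AND PROOFS =====

-- A's body and B's body as functions of the normalised title t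
def pvBodyA (t : String) : List String :=
  let variants : PySem.Set String := PySem.Set.ofList [t]
  let variants := pvTitleAliases.items.foldl
    (fun v ka => if ka.2.any (fun a => PySem.Str.isIn a t) then PySem.Set.update v ka.2 else v) variants
  let variants := if PySem.Str.isIn "compliance" t || PySem.Str.isIn "privacy" t then
      PySem.Set.update variants (PySem.Dict.getD pvTitleAliases "cco" []) else variants
  let variants := if PySem.Str.isIn "operations" t then
      PySem.Set.update variants (PySem.Dict.getD pvTitleAliases "coo" []) else variants
  let variants := if PySem.Str.isIn "sales" t || PySem.Str.isIn "revenue" t then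
      PySem.Set.update variants (PySem.Dict.getD pvTitleAliases "cro" []) else variants
  let variants := if PySem.Str.isIn "marketing" t then
      PySem.Set.update variants (PySem.Dict.getD pvTitleAliases "cmo" []) else variants
  let variants := if PySem.Str.isIn "it " t || PySem.Str.startswith t "it " || PySem.Str.isIn "information" t then
      PySem.Set.update variants (PySem.Dict.getD pvTitleAliases "cio" []) else variants
  let variants := if PySem.Str.isIn "technology" t || PySem.Str.isIn "engineering" t then
      PySem.Set.update variants (PySem.Dict.getD pvTitleAliases "cto" []) else variants
  let variants := if PySem.Str.isIn "finance" t || PySem.Str.isIn "financial" t || t == "cfo" then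
      PySem.Set.update variants (PySem.Dict.getD pvTitleAliases "cfo" []) else variants
  variants

def pvBodyB (t : String) : List String :=
  PySem.List.dedup
    (((((pvTitleAliases.items.filter (fun ka => ka.2.any (fun a => PySem.Set.contains (pvScan t.toList PySem.Set.empty) a))).map Prod.fst) ++
      ((pvHints.filter (fun kh => kh.2.any (fun h => PySem.Set.contains (pvScan t.toList PySem.Set.empty) h))).map Prod.fst)).foldl
      (fun acc k => acc ++ PySem.Dict.getD pvTitleAliases k []) [t]))

lemma bodyA_eq (raw_title : String) :
    title_variants raw_title = pvBodyA (PySem.Str.lower (PySem.Str.strip (if raw_title == "" then "" else raw_title))) := rfl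

lemma bodyB_eq (raw_title : String) :
    title_variants_alt raw_title = pvBodyB (PySem.Str.lower (PySem.Str.strip (if raw_title == "" then "" else raw_title))) := rfl

-- membership after the inner for-loop of the scan
lemma pv_step_mem (ps : List String) (s : List Char) (init : PySem.Set String) (q : String) :
    (q ∈ ps.foldl (fun h p => if PySem.Chars.startswith s p.toList then PySem.Set.add h p else h) init)
      ↔ q ∈ init ∨ (q ∈ ps ∧ PySem.Chars.startswith s q.toList = true) := by
  induction ps generalizing init with
  | nil => simp
  | cons p tl ih =>
    simp only [List.foldl_cons, ih]
    by_cases hq : q = p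
    · subst hq
      by_cases hs : PySem.Chars.startswith s q.toList = true
      · simp [hs, PySem.Set.mem_add]
      · simp [Bool.eq_false_iff.mpr hs]
    · by_cases hs : PySem.Chars.startswith s p.toList = true
      · simp [hs, PySem.Set.mem_add, hq]
      · simp [Bool.eq_false_iff.mpr hs, hq]

-- the bucket of c holds exactly the patterns whose first character is c
lemma pv_mem_bucket (q : String) (c : Char) :
    q ∈ PySem.Dict.getD pvFirst c [] ↔ q ∈ pvPatterns ∧ q.toList.headD ' ' = c := by
  have hmap : pvFirst = (pvPatterns.map (fun q => (q.toList.headD ' ', q))).foldl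
      (fun d p => d.modify p.1 [] (· ++ [p.2])) PySem.Dict.empty := by
    rw [List.foldl_map]; rfl
  rw [hmap, PySem.Dict.getD_foldl_modify_append, PySem.Dict.getD_empty]
  simp only [List.nil_append, List.mem_map, List.mem_filter, beq_iff_eq]
  constructor
  · rintro ⟨p, ⟨⟨a, ha, heq⟩, hkc⟩, hvq⟩
    subst heq; subst hvq
    exact ⟨ha, hkc⟩
  · rintro ⟨hq, hc⟩
    exact ⟨_, ⟨⟨q, hq, rfl⟩, hc⟩, rfl⟩

-- membership in the scan's hit set: q starts at some position of l
lemma pv_scan_mem (q : String) (hne : q.toList ≠ []) (l : List Char) (init : PySem.Set String) :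
    q ∈ pvScan l init ↔
      q ∈ init ∨ (q ∈ pvPatterns ∧ ∃ j, j < l.length ∧ PySem.Chars.startswith (l.drop j) q.toList = true) := by
  obtain ⟨q0, qr, hq⟩ : ∃ a l', q.toList = a :: l' := by
    cases hql : q.toList with
    | nil => exact absurd hql hne
    | cons a l' => exact ⟨a, l', rfl⟩
  induction l generalizing init with
  | nil => simp [pvScan]
  | cons c rest ih =>
    have hsw_head : ∀ {r : List Char}, PySem.Chars.startswith (c :: r) q.toList = true →
        q.toList.headD ' ' = c := by
      intro r hsw
      have hpre := (PySem.Chars.startswith_iff _ _).mp hsw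
      rw [hq] at hpre ⊢
      exact (List.cons_prefix_cons.mp hpre).1
    rw [pvScan, ih, pv_step_mem]
    constructor
    · rintro ((h | ⟨hp, hpre⟩) | ⟨hp, j, hj, hpre⟩)
      · exact Or.inl h
      · exact Or.inr ⟨((pv_mem_bucket q c).mp hp).1, 0, by simp, hpre⟩
      · exact Or.inr ⟨hp, j + 1, by simpa using hj, by simpa using hpre⟩
    · rintro (h | ⟨hp, j, hj, hpre⟩)
      · exact Or.inl (Or.inl h)
      · cases j with
        | zero =>
          exact Or.inl (Or.inr ⟨(pv_mem_bucket q c).mpr ⟨hp, hsw_head (by simpa using hpre)⟩,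
            by simpa using hpre⟩)
        | succ j => exact Or.inr ⟨hp, j, by simpa using hj, by simpa using hpre⟩

-- for a nonempty pattern of the table, membership in the hit set IS 'pattern in t'
lemma pv_hits_eq_isIn (t : String) (q : String) (hq : q ∈ pvPatterns) (hne : q.toList ≠ []) :
    PySem.Set.contains (pvScan t.toList PySem.Set.empty) q = PySem.Str.isIn q t := by
  rw [Bool.eq_iff_iff, PySem.Set.contains_iff, pv_scan_mem q hne, PySem.Str.isIn_iff_infix]
  constructor
  · rintro (h | ⟨-, j, hj, hpre⟩)
    · simp [PySem.Set.empty] at h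
    · have hp : q.toList <+: t.toList.drop j := (PySem.Chars.startswith_iff _ _).mp hpre
      exact hp.isInfix.trans (List.drop_suffix j t.toList).isInfix
  · rintro ⟨pre, suf, hsplit⟩
    refine Or.inr ⟨hq, pre.length, ?_, ?_⟩
    · have h1 : t.toList.length = pre.length + (q.toList.length + suf.length) := by
        rw [← hsplit]; simp
      have h2 : q.toList.length ≠ 0 := fun h0 => hne (List.eq_nil_of_length_eq_zero h0)
      omega
    · rw [(PySem.Chars.startswith_iff _ _), ← hsplit, List.append_assoc, List.drop_left]
      exact List.prefix_append q.toList suf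

-- every pattern used by the tables is in pvPatterns and nonempty (a closed fact about the literal tables)
set_option maxRecDepth 8192 in
lemma pv_table_patterns :
    (∀ ka ∈ pvTitleAliases.items, ∀ a ∈ ka.2, a ∈ pvPatterns ∧ a.toList ≠ []) ∧
    (∀ kh ∈ pvHints, ∀ h ∈ kh.2, h ∈ pvPatterns ∧ h.toList ≠ []) := by decide

-- B's hit-set membership tests are exactly A's substring tests, table row by table row
lemma pv_filter_alias (t : String) :
    pvTitleAliases.items.filter (fun ka => ka.2.any (fun a => PySem.Set.contains (pvScan t.toList PySem.Set.empty) a))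
      = pvTitleAliases.items.filter (fun ka => ka.2.any (fun a => PySem.Str.isIn a t)) := by
  apply List.filter_congr
  intro ka hka
  exact PySem.List.any_congr_mem (fun a ha =>
    pv_hits_eq_isIn t a (pv_table_patterns.1 ka hka a ha).1 (pv_table_patterns.1 ka hka a ha).2)

lemma pv_filter_hints (t : String) :
    pvHints.filter (fun kh => kh.2.any (fun h => PySem.Set.contains (pvScan t.toList PySem.Set.empty) h))
      = pvHints.filter (fun kh => kh.2.any (fun h => PySem.Str.isIn h t)) := by
  apply List.filter_congr
  intro kh hkh
  exact PySem.List.any_congr_mem (fun h hh =>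
    pv_hits_eq_isIn t h (pv_table_patterns.2 kh hkh h hh).1 (pv_table_patterns.2 kh hkh h hh).2)

lemma pv_update_ofList (L xs : List String) :
    PySem.Set.update (PySem.Set.ofList L) xs = PySem.Set.ofList (L ++ xs) := by
  simp [PySem.Set.update, PySem.Set.ofList_eq_foldl, List.foldl_append]

lemma pv_ite_update (c : Bool) (L xs : List String) :
    (if c then PySem.Set.update (PySem.Set.ofList L) xs else PySem.Set.ofList L)
      = PySem.Set.ofList (L ++ if c then xs else []) := by
  cases c <;> simp [pv_update_ofList]

lemma pv_foldA (tab : List (String × List String)) (p : String × List String → Bool) (L : List String) :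
    tab.foldl (fun v ka => if p ka then PySem.Set.update v ka.2 else v) (PySem.Set.ofList L)
      = PySem.Set.ofList (tab.foldl (fun a ka => if p ka then a ++ ka.2 else a) L) := by
  induction tab generalizing L with
  | nil => rfl
  | cons ka tl ih =>
    simp only [List.foldl_cons]
    by_cases h : p ka = true
    · simp [h, pv_update_ofList, ih]
    · simp [Bool.eq_false_iff.mpr h, ih]

lemma pv_foldB (tab : List (String × List String)) (p : String × List String → Bool)
    (g : String → List String) (init : List String) :
    ((tab.filter p).map Prod.fst).foldl (fun a k => a ++ g k) init
      = tab.foldl (fun a ka => if p ka then a ++ g ka.1 else a) init := by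
  induction tab generalizing init with
  | nil => rfl
  | cons ka tl ih =>
    by_cases h : p ka = true <;> simp [h, ih]

lemma pv_startswith_isIn (t : String) (h : PySem.Str.startswith t "it " = true) :
    PySem.Str.isIn "it " t = true := by
  rw [PySem.Str.isIn_iff_infix]
  exact ((PySem.Chars.startswith_iff (s := t.toList) (p := "it ".toList)).mp (by simpa using h)).isInfix

lemma pv_append_ite (c : Bool) (a x : List String) :
    (if c then a ++ x else a) = a ++ (if c then x else []) := by
  cases c <;> simp

lemma pv_bodies_eq (t : String) : pvBodyA t = pvBodyB t := by
  unfold pvBodyB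
  rw [pv_filter_alias, pv_filter_hints]
  have hg : ∀ (acc : List String), ∀ ka ∈ pvTitleAliases.items,
      (fun (a : List String) (ka : String × List String) =>
        a ++ if ka.2.any (fun al => PySem.Str.isIn al t) then PySem.Dict.getD pvTitleAliases ka.1 [] else []) acc ka
      = (fun (a : List String) (ka : String × List String) =>
        a ++ if ka.2.any (fun al => PySem.Str.isIn al t) then ka.2 else []) acc ka := by
    intro acc ka hka
    have : PySem.Dict.getD pvTitleAliases ka.1 [] = ka.2 := by
      fin_cases hka <;> rfl
    simp only [this]
  by_cases hc : t = "cfo"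
  · subst hc; decide
  · have hcb : (t == "cfo") = false := by simpa using hc
    have hcfo : (PySem.Str.isIn "finance" t || PySem.Str.isIn "financial" t || t == "cfo")
        = (PySem.Str.isIn "finance" t || PySem.Str.isIn "financial" t) := by
      simp [hcb]
    have hcio : (PySem.Str.isIn "it " t || PySem.Str.startswith t "it " || PySem.Str.isIn "information" t)
        = (PySem.Str.isIn "it " t || PySem.Str.isIn "information" t) := by
      by_cases hs : PySem.Str.startswith t "it " = true
      · simp only [hs, pv_startswith_isIn t hs, Bool.true_or]
      · rw [Bool.eq_false_iff.mpr hs]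
        cases PySem.Str.isIn "it " t <;> simp
    simp only [pvBodyA, PySem.List.dedup_eq_ofList, List.foldl_append, pv_foldB,
      PySem.List.foldl_congr_mem _ _ _ _ hg, pv_foldA, hcio, hcfo, pv_ite_update, pv_append_ite,
      pvHints, List.foldl_cons, List.foldl_nil, List.any_cons, List.any_nil, Bool.or_false,
      List.append_assoc]

-- ===== VERDICT (by name: the statement is the Claim_ definition above) =====
theorem title_variants_spec : Claim_equal_title_variants := by
  intro raw_title _
  unfold Spec_title_variants
  rw [bodyA_eq, bodyB_eq, pv_bodies_eq]
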